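-- pv_equiv track=rewrite | github.com/BojanUSI/Python-Algorithms | Assignment/ex2.py | algo_x
-- ===== SOURCE A (Python) =====
-- def algo_x(A,x):
--     B = [0]
--     for i in range(len(A)):
--         l = len(B)
--         for j in range(0, l):
--             s = B[j] + A[i]
--             if algo_y(B, s):
--                 B.append(s)
--
--     for i in range(len(B)):
--         if x >= B[i]:
--             return True
--
--     return False
--
-- def algo_y(A,x):
--     for i in range(len(A)):
--         if x == A[i]:
--             return False
--
--     return True
-- ===== SOURCE B (Python) =====
-- def algo_x(A, x):
--     # x >= min subset sum; the minimum subset sum is the sum of the negative elements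
--     return x >= sum(a for a in A if a < 0)
-- ===== Notes on version B (the rewrite author's own statement) =====
-- stated objective: faster
-- what changed: A enumerates all distinct subset sums (exponential) and scans them for one that x dominates; B uses the fact that the minimum subset sum is the sum of the negative elements and compares x against that single O(n) sum.
import Mathlib
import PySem

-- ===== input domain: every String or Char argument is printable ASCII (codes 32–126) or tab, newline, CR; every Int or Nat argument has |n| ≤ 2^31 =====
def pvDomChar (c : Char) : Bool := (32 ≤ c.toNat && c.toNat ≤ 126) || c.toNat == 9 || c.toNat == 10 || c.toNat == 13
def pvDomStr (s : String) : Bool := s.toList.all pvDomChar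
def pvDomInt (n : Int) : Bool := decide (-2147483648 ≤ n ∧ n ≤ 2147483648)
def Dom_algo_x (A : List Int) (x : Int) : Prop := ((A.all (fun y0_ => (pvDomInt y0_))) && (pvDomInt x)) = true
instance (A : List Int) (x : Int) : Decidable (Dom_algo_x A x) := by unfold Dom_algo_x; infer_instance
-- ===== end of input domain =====

-- B replaces A's exponential enumeration of all distinct subset sums by the single
-- O(n) sum of the negative elements (the minimum subset sum); return value equivalence only.

-- ===== PORT A =====
-- algo_y(A, x): returns False as soon as x equals an element, else True (loop over elements).
def algo_y (A : List Int) (x : Int) : Bool :=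
  match A with
  | [] => true
  | a :: t => if x == a then false else algo_y t x

-- one iteration of the inner 'for j in range(0, l)' body: B[j] read from the CURRENT list
def algoF (a : Int) (C : List Int) (j : Nat) : List Int :=
  if algo_y C ((PySem.List.pyGet? C (j : Int)).getD 0 + a) then
    C ++ [(PySem.List.pyGet? C (j : Int)).getD 0 + a]
  else C

-- one iteration of the outer loop: l = len(B) is snapshotted before the inner loop
def algoStep (B : List Int) (a : Int) : List Int :=
  (List.range B.length).foldl (algoF a) B

def algo_x (A : List Int) (x : Int) : Bool :=
  let B := A.foldl algoStep [0]
  B.any (fun b => decide (x ≥ b))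

-- ===== PORT B =====
-- sum(a for a in A if a < 0)
def negsum (A : List Int) : Int := (A.filter (fun a => decide (a < 0))).sum

def algo_x_alt (A : List Int) (x : Int) : Bool := decide (x ≥ negsum A)

-- ===== PRECONDITION & SPEC =====
def Spec_algo_x (A : List Int) (x : Int) (out : Bool) : Prop := out = algo_x_alt A x
instance (A : List Int) (x : Int) (out : Bool) : Decidable (Spec_algo_x A x out) := by unfold Spec_algo_x; infer_instance

-- ===== CLAIM (what is proved, stated in full; the proofs are below) =====
def Claim_equal_algo_x : Prop := ∀ (A : List Int) (x : Int), Dom_algo_x A x → Spec_algo_x A x (algo_x A x)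

-- ===== LEMMAS AND PROOFS =====

theorem algo_y_false_mem (C : List Int) (s : Int) (h : algo_y C s = false) : s ∈ C := by
  induction C with
  | nil => simp [algo_y] at h
  | cons a t ih =>
    by_cases hs : s = a
    · simp [hs]
    · simp only [algo_y, beq_iff_eq, if_neg hs] at h
      exact List.mem_cons_of_mem _ (ih h)

theorem prefix_algoF (a : Int) (C : List Int) (j : Nat) : C <+: algoF a C j := by
  unfold algoF
  split
  · exact ⟨_, rfl⟩
  · exact List.prefix_refl _

theorem foldl_algoF_prefix (a : Int) (J : List Nat) :
    ∀ C : List Int, C <+: J.foldl (algoF a) C := by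
  induction J with
  | nil => intro C; exact List.prefix_refl _
  | cons j t ih =>
    intro C
    exact List.IsPrefix.trans (prefix_algoF a C j) (ih (algoF a C j))

theorem getD_of_prefix {C C' : List Int} (h : C <+: C') {j : Nat} (hj : j < C.length) :
    (PySem.List.pyGet? C' (j : Int)).getD 0 = C.getD j 0 := by
  obtain ⟨t, rfl⟩ := h
  simp [PySem.List.pyGet?_natCast, List.getElem?_append_left hj, List.getD,
    List.getElem?_eq_getElem hj]

-- every element of the fold result is either an old element or an old element plus a
theorem foldl_algoF_shape (a : Int) (C : List Int) (J : List Nat) :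
    ∀ C' : List Int, C <+: C' → (∀ b ∈ C', b ∈ C ∨ ∃ c ∈ C, b = c + a) →
      (∀ j ∈ J, j < C.length) →
      C <+: J.foldl (algoF a) C' ∧
        ∀ b ∈ J.foldl (algoF a) C', b ∈ C ∨ ∃ c ∈ C, b = c + a := by
  induction J with
  | nil => intro C' hpre hshape _; exact ⟨hpre, hshape⟩
  | cons j t ih =>
    intro C' hpre hshape hJ
    have hj : j < C.length := hJ j (List.mem_cons_self)
    have hpre' : C <+: algoF a C' j :=
      List.IsPrefix.trans hpre (prefix_algoF a C' j)
    have hshape' : ∀ b ∈ algoF a C' j, b ∈ C ∨ ∃ c ∈ C, b = c + a := by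
      intro b hb
      unfold algoF at hb
      have hget : (PySem.List.pyGet? C' (j : Int)).getD 0 = C.getD j 0 :=
        getD_of_prefix hpre hj
      split at hb
      · rcases List.mem_append.1 hb with hb | hb
        · exact hshape b hb
        · simp only [List.mem_singleton] at hb
          refine Or.inr ⟨C.getD j 0, ?_, ?_⟩
          · rw [List.getD_eq_getElem _ _ hj]; exact List.getElem_mem hj
          · rw [hb, hget]
      · exact hshape b hb
    exact ih (algoF a C' j) hpre' hshape' (fun k hk => hJ k (List.mem_cons_of_mem _ hk))

-- for every index processed, C[j] + a ends up in the result
theorem foldl_algoF_cover (a : Int) (C : List Int) (J : List Nat) :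
    ∀ C' : List Int, C <+: C' → (∀ j ∈ J, j < C.length) →
      ∀ j ∈ J, C.getD j 0 + a ∈ J.foldl (algoF a) C' := by
  induction J with
  | nil => intro _ _ _ j hj; simp at hj
  | cons j0 t ih =>
    intro C' hpre hJ j hj
    have hj0 : j0 < C.length := hJ j0 (List.mem_cons_self)
    have hpre' : C <+: algoF a C' j0 :=
      List.IsPrefix.trans hpre (prefix_algoF a C' j0)
    rcases List.mem_cons.1 hj with rfl | hj
    · -- the element C[j] + a is present right after step j, and the fold only appends
      have hget : (PySem.List.pyGet? C' (j : Int)).getD 0 = C.getD j 0 :=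
        getD_of_prefix hpre hj0
      have hmem : C.getD j 0 + a ∈ algoF a C' j := by
        unfold algoF
        split
        · rw [hget]; simp
        · rename_i hfalse
          rw [hget] at hfalse
          exact algo_y_false_mem _ _ (Bool.eq_false_iff.2 hfalse ▸ rfl)
      have := (foldl_algoF_prefix a t (algoF a C' j)).subset hmem
      simpa [List.foldl_cons] using this
    · simpa [List.foldl_cons] using
        ih (algoF a C' j0) hpre' (fun k hk => hJ k (List.mem_cons_of_mem _ hk)) j hj

theorem algoStep_prefix (B : List Int) (a : Int) : B <+: algoStep B a :=
  foldl_algoF_prefix a _ B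

theorem algoStep_shape (B : List Int) (a : Int) :
    ∀ b ∈ algoStep B a, b ∈ B ∨ ∃ c ∈ B, b = c + a := by
  have := foldl_algoF_shape a B (List.range B.length) B (List.prefix_refl _)
    (fun b hb => Or.inl hb) (fun j hj => List.mem_range.1 hj)
  exact this.2

theorem algoStep_cover (B : List Int) (a : Int) :
    ∀ c ∈ B, c + a ∈ algoStep B a := by
  intro c hc
  obtain ⟨j, hj, rfl⟩ := List.mem_iff_getElem.1 hc
  have := foldl_algoF_cover a B (List.range B.length) B (List.prefix_refl _)
    (fun k hk => List.mem_range.1 hk) j (List.mem_range.2 hj)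
  rwa [List.getD_eq_getElem _ _ hj] at this

theorem negsum_cons (a : Int) (t : List Int) :
    negsum (a :: t) = (if a < 0 then a else 0) + negsum t := by
  by_cases h : a < 0
  · simp [negsum, List.filter_cons, h]
  · simp [negsum, List.filter_cons, h]

theorem outer_invariant (L : List Int) :
    ∀ (B : List Int) (m : Int), m ∈ B → (∀ b ∈ B, m ≤ b) →
      (m + negsum L ∈ L.foldl algoStep B) ∧
        (∀ b ∈ L.foldl algoStep B, m + negsum L ≤ b) := by
  induction L with
  | nil => intro B m hm hbd; simpa [negsum] using ⟨hm, hbd⟩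
  | cons a t ih =>
    intro B m hm hbd
    set m₁ : Int := m + (if a < 0 then a else 0) with hm₁
    have hmem₁ : m₁ ∈ algoStep B a := by
      by_cases ha : a < 0
      · have := algoStep_cover B a m hm
        simpa [hm₁, ha] using this
      · have := (algoStep_prefix B a).subset hm
        simpa [hm₁, ha] using this
    have hbd₁ : ∀ b ∈ algoStep B a, m₁ ≤ b := by
      intro b hb
      rcases algoStep_shape B a b hb with hb | ⟨c, hc, rfl⟩
      · have := hbd b hb
        rw [hm₁]; split_ifs with ha <;> omega
      · have := hbd c hc
        rw [hm₁]; split_ifs with ha <;> omega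
    have := ih (algoStep B a) m₁ hmem₁ hbd₁
    rw [negsum_cons]
    constructor
    · have h1 := this.1
      have : m + ((if a < 0 then a else 0) + negsum t) = m₁ + negsum t := by
        rw [hm₁]; ring
      rw [this]
      simpa [List.foldl_cons] using h1
    · intro b hb
      have h2 := this.2 b (by simpa [List.foldl_cons] using hb)
      have : m + ((if a < 0 then a else 0) + negsum t) = m₁ + negsum t := by
        rw [hm₁]; ring
      omega

-- ===== VERDICT (by name: the statement is the Claim_ definition above) =====
theorem algo_x_spec : Claim_equal_algo_x := by
  intro A x _
  unfold Spec_algo_x algo_x algo_x_alt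
  have h := outer_invariant A [0] 0 (List.mem_singleton.2 rfl)
    (by intro b hb; simp at hb; omega)
  rw [Bool.eq_iff_iff]
  simp only [List.any_eq_true, decide_eq_true_eq]
  constructor
  · rintro ⟨b, hb, hx⟩
    have := h.2 b hb
    omega
  · intro hx
    exact ⟨0 + negsum A, h.1, by omega⟩
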